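-- pv_equiv track=rewrite | github.com/digitaldutch1/Linux-KX0-005-Quiz | linux_quiz_1.00.3/linux.py | chunk_array_in_lines
-- ===== SOURCE A (Python) =====
-- def chunk_array_in_lines(arr, items_per_line=25):
--     """
--     Returns a string representation of a list of integers,
--     chunked with up to items_per_line items per line.
--     """
--     if not arr:
--         return "[]"
--
--     lines = []
--     chunk = []
--     for i, val in enumerate(arr, start=1):
--         chunk.append(str(val))
--         if i % items_per_line == 0:
--             lines.append(", ".join(chunk))
--             chunk = []
--     if chunk:
--         lines.append(", ".join(chunk))
--
--     joined_lines = []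
--     for i, line_content in enumerate(lines):
--         # If not the last line, add a comma at end
--         if i < len(lines) - 1:
--             joined_lines.append("  " + line_content + ",")
--         else:
--             joined_lines.append("  " + line_content)
--
--     result = "[\n" + "\n".join(joined_lines) + "\n]"
--     return result
-- ===== SOURCE B (Python) =====
-- def chunk_array_in_lines(arr, items_per_line=25):
--     """
--     Returns a string representation of a list of integers,
--     chunked with up to items_per_line items per line.
--     """
--     if not arr:
--         return "[]"
--     chunks = [arr[i:i + items_per_line] for i in range(0, len(arr), items_per_line)]
--     formatted = ["  " + ", ".join(str(v) for v in chunk) for chunk in chunks]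
--     return "[\n" + ",\n".join(formatted) + "\n]"
-- ===== Notes on version B (the rewrite author's own statement) =====
-- stated objective: simpler
-- what changed: Replaces the per-element accumulation with a modulo counter plus a separate trailing-comma pass by building the chunks up front with range-step slicing and assembling the result with a single ',\n'.join.
-- outside the precondition, e.g. on chunk_array_in_lines([1, 2, 3], -2): A returns '[\n  1, 2,\n  3\n]', B returns '[\n\n]'; on chunk_array_in_lines([1], 0): A raises ZeroDivisionError, B raises ValueError
import Mathlib
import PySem

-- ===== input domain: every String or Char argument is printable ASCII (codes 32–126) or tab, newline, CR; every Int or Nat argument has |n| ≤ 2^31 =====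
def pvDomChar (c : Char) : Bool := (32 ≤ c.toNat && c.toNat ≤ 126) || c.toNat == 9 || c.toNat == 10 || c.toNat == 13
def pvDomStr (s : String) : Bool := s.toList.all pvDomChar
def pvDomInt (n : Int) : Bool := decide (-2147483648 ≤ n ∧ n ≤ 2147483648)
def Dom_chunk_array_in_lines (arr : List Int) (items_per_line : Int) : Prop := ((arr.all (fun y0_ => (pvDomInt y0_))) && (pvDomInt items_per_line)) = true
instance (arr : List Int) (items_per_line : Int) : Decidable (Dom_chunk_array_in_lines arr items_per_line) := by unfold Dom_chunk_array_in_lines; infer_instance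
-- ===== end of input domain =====

-- B replaces A's per-element accumulation with a modulo counter and a separate
-- trailing-comma pass by slicing the chunks up front and joining them with ",\n"
-- (objective: simpler; equivalence proved on Pre_, return value only).

-- ===== PORT A =====
-- loop body of A's first 'for' loop (state = (lines, chunk))
def pvAstep (items_per_line : Int) (st : List String × List String) (iv : Int × Int) :
    List String × List String :=
  let chunk := st.2 ++ [PySem.Int.toStr iv.2]
  if PySem.Int.mod iv.1 items_per_line == 0 then
    (st.1 ++ [PySem.Str.join ", " chunk], [])
  else
    (st.1, chunk)

def chunk_array_in_lines (arr : List Int) (items_per_line : Int) : String :=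
  if arr = [] then "[]"
  else
    let st := (PySem.List.enumerate arr 1).foldl (pvAstep items_per_line) ([], [])
    let lines := if st.2 = [] then st.1 else st.1 ++ [PySem.Str.join ", " st.2]
    let joined_lines := (PySem.List.enumerate lines 0).foldl
      (fun acc p => if p.1 < (lines.length : Int) - 1
        then acc ++ ["  " ++ p.2 ++ ","]
        else acc ++ ["  " ++ p.2]) []
    "[\n" ++ PySem.Str.join "\n" joined_lines ++ "\n]"

-- ===== PORT B =====
def chunk_array_in_lines_alt (arr : List Int) (items_per_line : Int) : String :=
  if arr = [] then "[]"
  else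
    let chunks := (PySem.List.pyRange 0 (arr.length : Int) items_per_line).map
      (fun i => PySem.List.slice arr (some i) (some (i + items_per_line)))
    let formatted := chunks.map
      (fun c => "  " ++ PySem.Str.join ", " (c.map PySem.Int.toStr))
    "[\n" ++ PySem.Str.join ",\n" formatted ++ "\n]"

-- ===== PRECONDITION & SPEC =====
-- Pre_ excludes non-empty arr with non-positive items_per_line: at 0 A raises
-- ZeroDivisionError (B raises ValueError), and for negative values A's modulo
-- test accidentally chunks by |items_per_line| while B's range-step slicing
-- yields no chunks.
def Pre_chunk_array_in_lines (arr : List Int) (items_per_line : Int) : Prop :=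
  arr = [] ∨ 0 < items_per_line
instance (arr : List Int) (items_per_line : Int) : Decidable (Pre_chunk_array_in_lines arr items_per_line) := by unfold Pre_chunk_array_in_lines; infer_instance

def pvWitness_chunk_array_in_lines : List Int × Int := ([1, 2, 3], 2)

def Spec_chunk_array_in_lines (arr : List Int) (items_per_line : Int) (out : String) : Prop := out = chunk_array_in_lines_alt arr items_per_line
instance (arr : List Int) (items_per_line : Int) (out : String) : Decidable (Spec_chunk_array_in_lines arr items_per_line out) := by unfold Spec_chunk_array_in_lines; infer_instance

-- ===== CLAIM (what is proved, stated in full; the proofs are below) =====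
def Claim_equal_chunk_array_in_lines : Prop := ∀ (arr : List Int) (items_per_line : Int), Dom_chunk_array_in_lines arr items_per_line → Pre_chunk_array_in_lines arr items_per_line → Spec_chunk_array_in_lines arr items_per_line (chunk_array_in_lines arr items_per_line)

-- ===== LEMMAS AND PROOFS =====

def chunksL (k : Nat) : List Int → List (List Int)
  | [] => []
  | x :: xs => (x :: xs.take (k - 1)) :: chunksL k (xs.drop (k - 1))
termination_by xs => xs.length
decreasing_by simp

theorem chunksL_cons (k : Nat) (hk : 0 < k) (xs : List Int) (h : xs ≠ []) :
    chunksL k xs = xs.take k :: chunksL k (xs.drop k) := by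
  cases xs with
  | nil => exact absurd rfl h
  | cons x t =>
    have h1 : k = (k - 1) + 1 := by omega
    rw [chunksL]
    congr 1
    · rw [h1, List.take_succ_cons]; simp
    · rw [h1, List.drop_succ_cons]; simp

theorem chunksL_ne_nil (k : Nat) (xs : List Int) (h : xs ≠ []) : chunksL k xs ≠ [] := by
  cases xs with
  | nil => exact absurd rfl h
  | cons x t => rw [chunksL]; simp

theorem chunksL_short (k : Nat) (xs : List Int) (h : xs ≠ []) (h2 : xs.length ≤ k) :
    chunksL k xs = [xs] := by
  cases xs with
  | nil => exact absurd rfl h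
  | cons x t =>
    rw [chunksL]
    have h3 : t.length ≤ k - 1 := by simp at h2; omega
    rw [List.take_of_length_le h3, List.drop_of_length_le h3, chunksL]

theorem pyRange_pos_nil (a b s : Int) (hs : 0 < s) (h : b ≤ a) :
    PySem.List.pyRange a b s = [] := by
  rw [PySem.List.pyRange_of_pos _ _ hs, if_neg (by omega)]
  simp

theorem pyRange_pos_cons (a b s : Int) (hs : 0 < s) (h : a < b) :
    PySem.List.pyRange a b s = a :: PySem.List.pyRange (a + s) b s := by
  rw [PySem.List.pyRange_of_pos _ _ hs, PySem.List.pyRange_of_pos _ _ hs, if_pos h]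
  have key : b - a + s - 1 = (b - a - 1) + 1 * s := by ring
  have h1 : (b - a + s - 1) / s = (b - a - 1) / s + 1 := by
    rw [key, Int.add_mul_ediv_right _ _ (by omega)]
  have h2 : 0 ≤ (b - a - 1) / s := Int.ediv_nonneg (by omega) (by omega)
  have h3 : (b - a + s - 1) / s = ((b - a - 1) / s).toNat + 1 := by omega
  rw [h3]
  have h4 : (((((b-a-1)/s).toNat + 1 : Int)).toNat) = ((b-a-1)/s).toNat + 1 := by omega
  rw [h4, List.range_succ_eq_map]
  simp only [List.map_cons, List.map_map]
  congr 1
  · simp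
  · by_cases hb : a + s < b
    · have : b - (a + s) + s - 1 = b - a - 1 := by ring
      rw [if_pos hb, this]
      apply List.map_congr_left
      intro m hm
      simp [Function.comp, Nat.succ_eq_add_one]
      ring
    · rw [if_neg hb]
      have : (b - a - 1) / s = 0 := Int.ediv_eq_zero_of_lt (by omega) (by omega)
      rw [this]
      simp

theorem mapSlice (k : Nat) (hk : 0 < k) (arr : List Int) : ∀ (j : Nat),
    (PySem.List.pyRange (j : Int) (arr.length : Int) (k : Int)).map
      (fun i => PySem.List.slice arr (some i) (some (i + (k : Int)))) =
    chunksL k (arr.drop j) := by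
  intro j
  by_cases hj : j < arr.length
  case neg =>
    rw [pyRange_pos_nil _ _ _ (by exact_mod_cast hk) (by exact_mod_cast Nat.le_of_not_lt hj)]
    rw [List.drop_of_length_le (Nat.le_of_not_lt hj), List.map_nil, chunksL]
  case pos =>
    rw [pyRange_pos_cons _ _ _ (by exact_mod_cast hk) (by exact_mod_cast hj), List.map_cons]
    have hcast : ((j : Int) + (k : Int)) = ((j + k : Nat) : Int) := by push_cast; ring
    rw [chunksL_cons k hk _ (by simp [List.drop_eq_nil_iff]; omega)]
    congr 1
    · rw [PySem.List.slice_natCast_add arr j k]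
    · rw [hcast, mapSlice k hk arr (j + k), List.drop_drop]
termination_by j => arr.length - j
decreasing_by omega

def pvJoin (c : List Int) : String := PySem.Str.join ", " (c.map PySem.Int.toStr)

theorem innerFold (k q : Nat) (hk : 0 < k) : ∀ (c : List Int) (j : Nat),
    j + c.length < k → ∀ (lines ch : List String),
    (PySem.List.enumerate c (((q * k + j : Nat) : Int) + 1)).foldl (pvAstep (k : Int)) (lines, ch) =
      (lines, ch ++ c.map PySem.Int.toStr) := by
  intro c
  induction c with
  | nil => intro j hj lines ch; simp [PySem.List.enumerate]
  | cons v c' ih =>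
    intro j hj lines ch
    rw [PySem.List.enumerate_cons, List.foldl_cons]
    have hidx : ((q * k + j : Nat) : Int) + 1 = ((q * k + j + 1 : Nat) : Int) := by push_cast; ring
    have hmod : (q * k + j + 1) % k = j + 1 := by
      rw [show q * k + j + 1 = (j + 1) + k * q by ring, Nat.add_mul_mod_self_left]
      exact Nat.mod_eq_of_lt (by simp at hj; omega)
    have hstep : pvAstep (k : Int) (lines, ch) (((q * k + j : Nat) : Int) + 1, v) =
        (lines, ch ++ [PySem.Int.toStr v]) := by
      unfold pvAstep
      rw [hidx, PySem.Int.mod_natCast, hmod]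
      simp
      omega
    rw [hstep]
    have hidx2 : ((q * k + j : Nat) : Int) + 1 + 1 = ((q * k + (j + 1) : Nat) : Int) + 1 := by
      push_cast; ring
    rw [hidx2, ih (j + 1) (by simp at hj ⊢; omega) lines (ch ++ [PySem.Int.toStr v])]
    simp

theorem fullChunk (k q : Nat) (hk : 0 < k) (c : List Int) (hlen : c.length = k)
    (lines : List String) :
    (PySem.List.enumerate c (((q * k : Nat) : Int) + 1)).foldl (pvAstep (k : Int)) (lines, []) =
      (lines ++ [pvJoin c], []) := by
  have hne : c ≠ [] := by intro h; rw [h] at hlen; simp at hlen; omega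
  have hsplit := List.dropLast_append_getLast hne
  set last := c.getLast hne with hlast
  conv_lhs => rw [← hsplit]
  rw [PySem.List.enumerate_append, List.foldl_append]
  have hdl : c.dropLast.length = k - 1 := by rw [List.length_dropLast, hlen]
  rw [show ((q * k : Nat) : Int) + 1 = ((q * k + 0 : Nat) : Int) + 1 by norm_num]
  rw [innerFold k q hk c.dropLast 0 (by omega) lines []]
  rw [PySem.List.enumerate_cons]
  simp only [PySem.List.enumerate_nil, List.foldl_cons, List.foldl_nil, List.nil_append]
  have hidx : ((q * k + 0 : Nat) : Int) + 1 + (c.dropLast.length : Int) =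
      (((q + 1) * k : Nat) : Int) := by rw [hdl, show (q + 1) * k = q * k + k from by ring]; omega
  rw [hidx]
  have hmod : PySem.Int.mod (((q + 1) * k : Nat) : Int) (k : Int) = 0 := by
    rw [PySem.Int.mod_natCast, Nat.mul_mod_left]
    norm_num
  unfold pvAstep
  rw [hmod]
  simp only [beq_self_eq_true, if_pos]
  congr 2
  unfold pvJoin
  congr 1
  conv_rhs => rw [← hsplit]
  simp

theorem foldG (k : Nat) (hk : 0 < k) (xs : List Int) (q : Nat) (lines : List String) :
    (PySem.List.enumerate xs (((q * k : Nat) : Int) + 1)).foldl (pvAstep (k : Int)) (lines, []) =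
      (if xs.length % k = 0 then (lines ++ (chunksL k xs).map pvJoin, [])
       else (lines ++ ((chunksL k xs).dropLast).map pvJoin,
             ((chunksL k xs).getLastD []).map PySem.Int.toStr)) := by
  by_cases h0 : xs = []
  · subst h0
    rw [if_pos (by simp)]
    simp [PySem.List.enumerate, chunksL]
  · by_cases hlt : xs.length < k
    · have hm : xs.length % k = xs.length := Nat.mod_eq_of_lt hlt
      have hne0 : xs.length ≠ 0 := by simp [h0]
      rw [if_neg (by omega)]
      rw [show ((q * k : Nat) : Int) + 1 = ((q * k + 0 : Nat) : Int) + 1 by norm_num]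
      rw [innerFold k q hk xs 0 (by omega) lines []]
      rw [chunksL_short k xs h0 (by omega)]
      simp
    · rw [Nat.not_lt] at hlt
      have hc : (xs.take k).length = k := by simp; omega
      conv_lhs => rw [← List.take_append_drop k xs]
      rw [PySem.List.enumerate_append, List.foldl_append]
      rw [fullChunk k q hk (xs.take k) hc lines]
      have hidx : ((q * k : Nat) : Int) + 1 + ((xs.take k).length : Int) =
          ((((q + 1) * k : Nat)) : Int) + 1 := by
        rw [hc, show (q + 1) * k = q * k + k from by ring]; push_cast; ring
      rw [hidx]
      rw [foldG k hk (xs.drop k) (q + 1) (lines ++ [pvJoin (xs.take k)])]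
      have hlen : xs.length % k = (xs.drop k).length % k := by
        rw [List.length_drop]
        conv_lhs => rw [show xs.length = k + (xs.length - k) from by omega]
        rw [Nat.add_mod_left]
      rw [chunksL_cons k hk xs h0]
      by_cases hz : (xs.drop k).length % k = 0
      · rw [if_pos hz, if_pos (by omega)]
        simp
      · rw [if_neg hz, if_neg (by omega)]
        have hrne : xs.drop k ≠ [] := by
          intro h; rw [h] at hz; simp at hz
        have hcsne : chunksL k (xs.drop k) ≠ [] := chunksL_ne_nil k _ hrne
        obtain ⟨l', x, hx⟩ : ∃ l' x, chunksL k (xs.drop k) = l' ++ [x] :=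
          ⟨_, _, (List.dropLast_append_getLast hcsne).symm⟩
        rw [hx]
        refine Prod.ext ?_ ?_
        · rw [show (xs.take k :: (l' ++ [x])).dropLast = xs.take k :: l' from by
            rw [← List.cons_append, List.dropLast_concat], List.dropLast_concat]
          simp
        · rw [show xs.take k :: (l' ++ [x]) = (xs.take k :: l') ++ [x] from by simp,
            List.getLastD_concat, List.getLastD_concat]
termination_by xs.length
decreasing_by simp; omega

theorem chunksL_mem_ne_nil (k : Nat) : ∀ (xs : List Int), ∀ c ∈ chunksL k xs, c ≠ [] := by
  intro xs
  match xs with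
  | [] => simp [chunksL]
  | x :: t =>
    rw [chunksL]
    intro c hc
    rcases List.mem_cons.1 hc with h | h
    · subst h; simp
    · exact chunksL_mem_ne_nil k (t.drop (k - 1)) c h
termination_by xs => xs.length
decreasing_by simp

theorem linesA (k : Nat) (hk : 0 < k) (arr : List Int) (h : arr ≠ []) :
    (let st := (PySem.List.enumerate arr 1).foldl (pvAstep (k : Int)) ([], []);
     if st.2 = [] then st.1 else st.1 ++ [PySem.Str.join ", " st.2]) =
    (chunksL k arr).map pvJoin := by
  rw [show (1 : Int) = ((0 * k : Nat) : Int) + 1 from by norm_num]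
  rw [foldG k hk arr 0 []]
  by_cases hz : arr.length % k = 0
  · rw [if_pos hz]; simp
  · rw [if_neg hz]
    have hcsne : chunksL k arr ≠ [] := chunksL_ne_nil k arr h
    obtain ⟨l', x, hx⟩ : ∃ l' x, chunksL k arr = l' ++ [x] :=
      ⟨_, _, (List.dropLast_append_getLast hcsne).symm⟩
    have hxne : x ≠ [] := chunksL_mem_ne_nil k arr x (hx ▸ List.mem_append_right _ (by simp))
    rw [hx, List.getLastD_concat, List.dropLast_concat]
    have hmapne : x.map PySem.Int.toStr ≠ [] := by simp [hxne]
    simp only [if_neg hmapne]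
    simp [pvJoin]

theorem genJoin : ∀ (ls : List String), ls ≠ [] → ∀ (s n : Int), s + ls.length = n →
    PySem.Chars.join ['\n']
      (((PySem.List.enumerate ls s).map
        (fun p => if p.1 < n - 1 then "  " ++ p.2 ++ "," else "  " ++ p.2)).map String.toList) =
    PySem.Chars.join [',', '\n'] ((ls.map (fun x => "  " ++ x)).map String.toList) := by
  intro ls
  induction ls with
  | nil => intro h; exact absurd rfl h
  | cons x t ih =>
    intro _ s n hn
    cases t with
    | nil =>
      simp only [PySem.List.enumerate_cons, PySem.List.enumerate_nil, List.map_cons, List.map_nil]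
      rw [if_neg (by simp at hn; omega)]
      rw [PySem.Chars.join_singleton, PySem.Chars.join_singleton]
    | cons y r =>
      simp only [PySem.List.enumerate_cons, List.map_cons]
      rw [if_pos (by simp at hn ⊢; omega)]
      rw [PySem.Chars.join_cons_cons, PySem.Chars.join_cons_cons]
      have hih := ih (by simp) (s + 1) n (by simp at hn ⊢; omega)
      simp only [PySem.List.enumerate_cons, List.map_cons] at hih
      rw [hih]
      simp [String.toList_append]


-- ===== VERDICT (by name: the statement is the Claim_ definition above) =====
theorem chunk_array_in_lines_spec : Claim_equal_chunk_array_in_lines := by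
  intro arr ipl _ hpre
  unfold Spec_chunk_array_in_lines
  by_cases h0 : arr = []
  · subst h0
    rw [chunk_array_in_lines, chunk_array_in_lines_alt, if_pos rfl, if_pos rfl]
  · replace hpre : 0 < ipl := by
      rcases hpre with h | h
      · exact absurd h h0
      · exact h
    set k := ipl.toNat
    have hk : 0 < k := by omega
    have hipl : ipl = (k : Int) := by omega
    rw [chunk_array_in_lines, chunk_array_in_lines_alt, if_neg h0, if_neg h0, hipl]
    have hchunks : (PySem.List.pyRange 0 (arr.length : Int) (k : Int)).map
        (fun i => PySem.List.slice arr (some i) (some (i + (k : Int)))) = chunksL k arr := by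
      rw [show (0 : Int) = ((0 : Nat) : Int) from rfl, mapSlice k hk arr 0, List.drop_zero]
    dsimp only
    rw [hchunks]
    have hlines := linesA k hk arr h0
    simp only at hlines
    rw [hlines]
    set ls := (chunksL k arr).map pvJoin with hls
    have hlsne : ls ≠ [] := by
      rw [hls]
      simp [chunksL_ne_nil k arr h0]
    refine congrArg (fun z => "[\n" ++ z ++ "\n]") ?_
    -- middle join equality
    have hbody : (fun (acc : List String) (p : Int × String) =>
        if p.1 < (ls.length : Int) - 1 then acc ++ ["  " ++ p.2 ++ ","] else acc ++ ["  " ++ p.2])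
        = (fun acc p => acc ++ [if p.1 < (ls.length : Int) - 1
            then "  " ++ p.2 ++ "," else "  " ++ p.2]) := by
      funext acc p
      split <;> rfl
    rw [hbody, PySem.List.foldl_append_singleton_eq_map
      (fun p : Int × String => if p.1 < (ls.length : Int) - 1
        then "  " ++ p.2 ++ "," else "  " ++ p.2), List.nil_append]
    have hfmt : List.map (fun c => "  " ++ PySem.Str.join ", " (List.map PySem.Int.toStr c)) (chunksL k arr)
        = ls.map (fun x => "  " ++ x) := by
      rw [hls, List.map_map]; rfl
    rw [hfmt]
    apply String.toList_inj.mp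
    simp only [PySem.Str.join, String.toList_ofList]
    have h1 : ("\n" : String).toList = ['\n'] := rfl
    have h2 : (",\n" : String).toList = [',', '\n'] := rfl
    rw [h1, h2]
    exact genJoin ls hlsne 0 (ls.length : Int) (by simp)
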